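-- pv_equiv track=rewrite | github.com/fishsuper/LeetCodes | t1060.py | KthMissingNumber
-- ===== SOURCE A (Python) =====
-- def KthMissingNumber(A, K):
--     headNumber = A[0]
--     tempNumber = headNumber
--     k = 0
--     index = 0
--     while k < K:
--         tempNumber += 1
--         if A[index+1] != tempNumber:
--             k += 1
--         else:
--             index += 1
--
--     return tempNumber
-- ===== SOURCE B (Python) =====
-- def KthMissingNumber(A, K):
--     # One pass over consecutive pairs, jumping whole gaps arithmetically
--     # instead of counting missing numbers one by one.
--     prev = A[0]
--     miss = 0
--     for cur in A[1:]:
--         if cur <= prev: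
--             break
--         gap = cur - prev - 1
--         if miss + gap >= K:
--             break
--         miss += gap
--         prev = cur
--     return prev + (K - miss) if K > 0 else A[0]
-- ===== Notes on version B (the rewrite author's own statement) =====
-- stated objective: faster
-- what changed: A counts candidate numbers one by one (one loop iteration per number up to the answer); B makes a single pass over consecutive pairs of the array and jumps every gap arithmetically, stopping at the pair containing the K-th missing number.
import Mathlib
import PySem

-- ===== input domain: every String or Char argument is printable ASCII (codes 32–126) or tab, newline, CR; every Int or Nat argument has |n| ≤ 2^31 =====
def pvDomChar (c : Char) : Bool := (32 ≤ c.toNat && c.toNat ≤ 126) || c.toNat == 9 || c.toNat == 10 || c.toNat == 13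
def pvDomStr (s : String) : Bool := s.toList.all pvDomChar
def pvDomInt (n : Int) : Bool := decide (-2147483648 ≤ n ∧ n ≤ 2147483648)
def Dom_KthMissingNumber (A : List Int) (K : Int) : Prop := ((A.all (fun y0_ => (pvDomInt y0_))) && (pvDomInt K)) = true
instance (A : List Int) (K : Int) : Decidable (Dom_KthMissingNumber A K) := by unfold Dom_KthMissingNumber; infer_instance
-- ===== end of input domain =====

-- B replaces A's one-by-one counting loop (one iteration per candidate number) with a
-- single pass over consecutive pairs that jumps each gap arithmetically; the return
-- value is proved equal on Pre_ (exactly the inputs where A returns without raising).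

-- ===== PORT A =====
-- A's while loop; state (tempNumber, k, index); `none` = the IndexError of A[index+1]
def aLoop (A : List Int) (K : Int) (temp k : Int) (index : Nat) : Option Int :=
  if k < K then
    let t := temp + 1
    match h : PySem.List.pyGet? A ((index : Int) + 1) with
    | none => none
    | some x =>
      if x ≠ t then aLoop A K t (k + 1) index
      else aLoop A K t k (index + 1)
  else some temp
termination_by ((K - k).toNat, A.length - index)
decreasing_by
  · apply Prod.Lex.left; omega
  · have hne : ¬ (PySem.List.pyGet? A ((index : Int) + 1) = none) := by simp [h]
    rw [PySem.List.pyGet?_eq_none_iff] at hne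
    have hlt : index + 1 ≤ A.length := by
      by_contra hc
      exact hne (by simp [PySem.Raise.InRange] at *; omega)
    apply Prod.Lex.right'
    · omega
    · omega

def KthMissingNumber (A : List Int) (K : Int) : Int :=
  -- headNumber = A[0]; the IndexError on A = [] is excluded by Pre_
  let headNumber := (PySem.List.pyGet? A 0).getD 0
  (aLoop A K headNumber 0 0).getD 0

-- ===== PORT B =====
-- the for-loop of Source B over A[1:] with its two breaks; returns (prev, miss)
def bLoop (K : Int) : List Int → Int → Int → Int × Int
  | [], prev, miss => (prev, miss)
  | cur :: rest, prev, miss =>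
    if cur ≤ prev then (prev, miss)
    else
      let gap := cur - prev - 1
      if miss + gap ≥ K then (prev, miss)
      else bLoop K rest cur (miss + gap)

def KthMissingNumber_alt (A : List Int) (K : Int) : Int :=
  let prev0 := (PySem.List.pyGet? A 0).getD 0
  let r := bLoop K (PySem.List.slice A (some 1) none) prev0 0
  if K > 0 then r.1 + (K - r.2) else prev0

-- ===== PRECONDITION & SPEC =====
-- Pre_ excludes exactly the inputs where A raises IndexError: the empty list, and
-- (for K > 0) a strictly increasing A with fewer than K interior missing numbers,
-- where A's index runs past the end of the list.
def Pre_KthMissingNumber (A : List Int) (K : Int) : Prop :=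
  A ≠ [] ∧ (K ≤ 0 ∨
    ¬ (List.IsChain (· < ·) A ∧ A.getLastD 0 - A.headD 0 - ((A.length : Int) - 1) < K))
instance (A : List Int) (K : Int) : Decidable (Pre_KthMissingNumber A K) := by
  unfold Pre_KthMissingNumber; infer_instance

def pvWitness_KthMissingNumber : List Int × Int := ([2, 3, 7, 7, 11], 4)

def Spec_KthMissingNumber (A : List Int) (K : Int) (out : Int) : Prop := out = KthMissingNumber_alt A K
instance (A : List Int) (K : Int) (out : Int) : Decidable (Spec_KthMissingNumber A K out) := by unfold Spec_KthMissingNumber; infer_instance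

-- ===== CLAIM (what is proved, stated in full; the proofs are below) =====
def Claim_equal_KthMissingNumber : Prop := ∀ (A : List Int) (K : Int), Dom_KthMissingNumber A K → Pre_KthMissingNumber A K → Spec_KthMissingNumber A K (KthMissingNumber A K)

-- ===== LEMMAS AND PROOFS =====

-- proof-side description of A's loop outcome, stage by stage (none = runs off the end)
def bRunO (K : Int) : List Int → Int → Int → Option Int
  | [], _, _ => none
  | cur :: rest, prev, miss =>
    if cur ≤ prev then some (prev + (K - miss))
    else if miss + (cur - prev - 1) ≥ K then some (prev + (K - miss))
    else bRunO K rest cur (miss + (cur - prev - 1))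

-- A's loop when the next element is ≤ temp: it never matches again, every step counts
lemma aLoop_stuck (A : List Int) (K : Int) : ∀ n : Nat, ∀ temp k : Int, ∀ index : Nat, ∀ x : Int,
    (K - k).toNat = n → k < K → PySem.List.pyGet? A ((index : Int) + 1) = some x → x ≤ temp →
    aLoop A K temp k index = some (temp + (K - k)) := by
  intro n
  induction n with
  | zero => intro temp k index x hn hk _ _; omega
  | succ m ih =>
    intro temp k index x hn hk hx hle
    rw [aLoop]
    simp only [if_pos hk]
    split
    · rename_i heq; rw [hx] at heq; cases heq
    · rename_i y heq; rw [hx] at heq; injection heq with heq; subst heq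
      have hne : x ≠ temp + 1 := by omega
      simp only [if_pos hne]
      by_cases hk1 : k + 1 < K
      · rw [ih (temp + 1) (k + 1) index x (by omega) hk1 hx (by omega)]
        congr 1; omega
      · rw [aLoop]
        simp only [if_neg hk1]
        congr 1; omega

-- A's loop across one gap: it either answers inside the gap or matches the next element
lemma aLoop_gap (A : List Int) (K : Int) : ∀ g : Nat, ∀ temp k : Int, ∀ index : Nat, ∀ x : Int,
    PySem.List.pyGet? A ((index : Int) + 1) = some x → x = temp + (g : Int) + 1 → k < K →
    aLoop A K temp k index =
      if k + (g : Int) < K then aLoop A K x (k + (g : Int)) (index + 1)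
      else some (temp + (K - k)) := by
  intro g
  induction g with
  | zero =>
    intro temp k index x hx hxe hk
    rw [aLoop]
    simp only [if_pos hk]
    split
    · rename_i heq; rw [hx] at heq; cases heq
    · rename_i y heq; rw [hx] at heq; injection heq with heq; subst heq
      have hcond : k + ((0 : Nat) : Int) < K := by push_cast; omega
      simp only [if_pos hcond]
      have : ¬ (x ≠ temp + 1) := by push_cast at hxe; omega
      simp only [if_neg this]
      congr 1 <;> omega
  | succ m ih =>
    intro temp k index x hx hxe hk
    rw [aLoop]
    simp only [if_pos hk]
    split
    · rename_i heq; rw [hx] at heq; cases heq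
    · rename_i y heq; rw [hx] at heq; injection heq with heq; subst heq
      have hne : x ≠ temp + 1 := by push_cast at hxe; omega
      simp only [if_pos hne]
      by_cases hk1 : k + 1 < K
      · rw [ih (temp + 1) (k + 1) index x hx (by push_cast at hxe ⊢; omega) hk1]
        by_cases hcond : k + 1 + (m : Int) < K
        · have hcond' : k + ((m + 1 : Nat) : Int) < K := by push_cast at hcond ⊢; omega
          simp only [if_pos hcond, if_pos hcond']
          have harg : k + 1 + (m : Int) = k + ((m + 1 : Nat) : Int) := by push_cast; ring
          rw [harg]
        · have hcond' : ¬ (k + ((m + 1 : Nat) : Int) < K) := by push_cast at hcond ⊢; omega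
          simp only [if_neg hcond, if_neg hcond']
          congr 1; omega
      · have hcond' : ¬ (k + ((m + 1 : Nat) : Int) < K) := by push_cast; omega
        rw [aLoop]
        simp only [if_neg hk1, if_neg hcond']
        congr 1; omega

-- the whole of A's loop equals the stage-by-stage description
lemma aLoop_eq_bRunO (A : List Int) (K : Int) : ∀ rest : List Int, ∀ index : Nat, ∀ prev miss : Int,
    A.drop (index + 1) = rest → miss < K →
    aLoop A K prev miss index = bRunO K rest prev miss := by
  intro rest
  induction rest with
  | nil =>
    intro index prev miss hdrop hm
    have hlen : A.length ≤ index + 1 := by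
      by_contra hc
      have := congrArg List.length hdrop
      simp [List.length_drop] at this; omega
    have hnone : PySem.List.pyGet? A ((index : Int) + 1) = none := by
      have hc : ((index : Int) + 1) = (((index + 1 : Nat)) : Int) := by push_cast; ring
      rw [hc, PySem.List.pyGet?_natCast]
      exact List.getElem?_eq_none hlen
    rw [aLoop]
    simp only [if_pos hm]
    split
    · simp [bRunO]
    · rename_i y heq; rw [hnone] at heq; cases heq
  | cons cur rest' ih =>
    intro index prev miss hdrop hm
    have hget : PySem.List.pyGet? A ((index : Int) + 1) = some cur := by
      have h0 : A[index + 1]? = some cur := by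
        have h1 : (A.drop (index + 1))[0]? = A[(index + 1) + 0]? := List.getElem?_drop
        rw [hdrop] at h1; simpa using h1.symm
      have hc : ((index : Int) + 1) = (((index + 1 : Nat)) : Int) := by push_cast; ring
      rw [hc, PySem.List.pyGet?_natCast, h0]
    by_cases hle : cur ≤ prev
    · rw [aLoop_stuck A K (K - miss).toNat prev miss index cur rfl hm hget hle]
      simp [bRunO, hle]
    · have hgt : prev < cur := by omega
      have hcur : cur = prev + (((cur - prev - 1).toNat : Nat) : Int) + 1 := by omega
      rw [aLoop_gap A K (cur - prev - 1).toNat prev miss index cur hget hcur hm]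
      by_cases hcond : miss + (((cur - prev - 1).toNat : Nat) : Int) < K
      · have hdrop' : A.drop (index + 1 + 1) = rest' := by
          rw [← List.drop_drop, hdrop]; rfl
        rw [if_pos hcond, ih (index + 1) cur (miss + (((cur - prev - 1).toNat : Nat) : Int))
          (by simpa using hdrop') hcond]
        simp only [bRunO, if_neg hle]
        have hno : ¬ (miss + (cur - prev - 1) ≥ K) := by omega
        simp only [ge_iff_le, if_neg (by omega : ¬ K ≤ miss + (cur - prev - 1))]
        congr 2 <;> omega
      · rw [if_neg hcond]
        simp only [bRunO, if_neg hle]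
        have hyes : K ≤ miss + (cur - prev - 1) := by omega
        simp [hyes]

-- when the description returns, it is B's loop result assembled as in Source B
lemma bRunO_some (K : Int) : ∀ rest : List Int, ∀ prev miss r : Int,
    bRunO K rest prev miss = some r →
    r = (bLoop K rest prev miss).1 + (K - (bLoop K rest prev miss).2) := by
  intro rest
  induction rest with
  | nil => intro prev miss r h; simp [bRunO] at h
  | cons cur rest' ih =>
    intro prev miss r h
    by_cases hle : cur ≤ prev
    · simp [bRunO, hle] at h; simp [bLoop, hle]; omega
    · by_cases hcond : miss + (cur - prev - 1) ≥ K
      · simp only [bRunO, if_neg hle, if_pos hcond, Option.some.injEq] at h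
        simp only [bLoop, if_neg hle, if_pos hcond]
        omega
      · simp only [bRunO, if_neg hle, if_neg hcond] at h
        simp only [bLoop, if_neg hle, if_neg hcond]
        exact ih cur (miss + (cur - prev - 1)) r h

-- the description runs off the end only on a strictly increasing tail with too few gaps
lemma bRunO_none (K : Int) : ∀ rest : List Int, ∀ prev miss : Int, miss < K →
    bRunO K rest prev miss = none →
    List.IsChain (· < ·) (prev :: rest) ∧
      miss + (rest.getLastD prev - prev - (rest.length : Int)) < K := by
  intro rest
  induction rest with
  | nil =>
    intro prev miss hm _
    exact ⟨List.IsChain.singleton prev, by simpa using hm⟩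
  | cons cur rest' ih =>
    intro prev miss hm h
    by_cases hle : cur ≤ prev
    · simp [bRunO, hle] at h
    · by_cases hcond : miss + (cur - prev - 1) ≥ K
      · simp [bRunO, hle, hcond] at h
      · simp only [bRunO, if_neg hle, if_neg hcond] at h
        obtain ⟨hchain, hlt⟩ := ih cur (miss + (cur - prev - 1)) (by omega) h
        refine ⟨List.isChain_cons_cons.mpr ⟨by omega, hchain⟩, ?_⟩
        simp only [List.getLastD_cons, List.length_cons] at *
        push_cast at hlt ⊢
        omega

-- ===== VERDICT (by name: the statement is the Claim_ definition above) =====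
theorem KthMissingNumber_spec : Claim_equal_KthMissingNumber := by
  intro A K _ hpre
  unfold Spec_KthMissingNumber
  obtain ⟨hne, hdisj⟩ := hpre
  obtain ⟨a0, tl, rfl⟩ := List.exists_cons_of_ne_nil hne
  unfold KthMissingNumber KthMissingNumber_alt
  simp only [PySem.List.pyGet?_zero_cons, Option.getD_some, PySem.List.slice_from_one,
    List.tail_cons]
  by_cases hK : 0 < K
  · have h1 : aLoop (a0 :: tl) K a0 0 0 = bRunO K tl a0 0 :=
      aLoop_eq_bRunO (a0 :: tl) K tl 0 a0 0 (by simp) hK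
    cases hres : bRunO K tl a0 0 with
    | none =>
      obtain ⟨hchain, hlt⟩ := bRunO_none K tl a0 0 hK hres
      exfalso
      rcases hdisj with h | h
      · omega
      · exact h ⟨hchain, by
          simp only [List.getLastD_cons, List.headD_cons, List.length_cons]
          push_cast at hlt ⊢; omega⟩
    | some r =>
      rw [h1, hres]
      simp only [Option.getD_some, if_pos hK]
      exact bRunO_some K tl a0 0 r hres
  · rw [aLoop]
    simp [hK]
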